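-- pv_equiv track=rewrite | github.com/Golden-Leaves/Financial-Ledger | klechkovski_sequence.py | klechkovski
-- ===== SOURCE A (Python) =====
-- def klechkovski(n,l = None):
--
--     quantum_hash = {'s': 0, 'p': 1, 'd': 2, 'f': 3}
--     reversed_quantum_hash = {v: k for k, v in quantum_hash.items()}
--     klechkovski_sequence = []
--     if not l:
--         l = n - 1 #Sets l to the maximum that the max shell can handle
--     for shell in range(1,n + 1):
--         for subshell in range(shell):
--             if subshell in reversed_quantum_hash:
--                 label = f"{shell}{reversed_quantum_hash[subshell]}"
--                 priority = shell + subshell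
--                 klechkovski_sequence.append((priority,shell,label)) #Sort by priority, then by n(if tie like 2p and 3s)
--     klechkovski_sequence.sort()
--     return klechkovski_sequence
-- ===== SOURCE B (Python) =====
-- def klechkovski(n, l=None):
--     letters = ('s', 'p', 'd', 'f')
--     if not l:
--         l = n - 1  # kept for parity with the original; unused
--     sequence = []
--     # walk the Madelung diagonals directly: priority p = shell + subshell
--     for priority in range(1, 2 * n):
--         for subshell in range(3, -1, -1):
--             shell = priority - subshell
--             if 1 <= shell <= n and subshell < shell:
--                 sequence.append((priority, shell, f"{shell}{letters[subshell]}"))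
--     return sequence
-- ===== Notes on version B (the rewrite author's own statement) =====
-- stated objective: faster
-- what changed: B emits the subshells directly in Madelung order by walking the diagonals p = shell+subshell (inner loop subshell 3..0 so shell ascends), eliminating the generate-then-sort pass.
import Mathlib
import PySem

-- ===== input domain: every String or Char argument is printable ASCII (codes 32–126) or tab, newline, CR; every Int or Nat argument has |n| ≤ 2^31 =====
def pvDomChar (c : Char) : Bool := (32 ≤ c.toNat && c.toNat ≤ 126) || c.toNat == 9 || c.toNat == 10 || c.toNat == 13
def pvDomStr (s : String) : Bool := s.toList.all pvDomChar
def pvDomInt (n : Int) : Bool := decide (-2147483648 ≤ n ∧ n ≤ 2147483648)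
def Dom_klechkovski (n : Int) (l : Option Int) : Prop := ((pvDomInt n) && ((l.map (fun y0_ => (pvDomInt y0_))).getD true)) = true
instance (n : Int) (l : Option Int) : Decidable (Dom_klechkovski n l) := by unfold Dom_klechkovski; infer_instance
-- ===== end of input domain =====

-- B replaces A's generate-all-then-sort by a direct walk of the Madelung diagonals, producing the
-- same list already in order (parameter `l` is dead in both, as in the Python).

-- ===== PORT A =====
-- Python's list.sort() on these tuples is lexicographic; ported with a lexicographic key on all
-- three components (Int ×ₗ (Int ×ₗ String)), exact on every tuple list.
def klechkovski (n : Int) (l : Option Int) : List (Int × Int × String) :=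
  let quantum_hash : PySem.Dict String Int := ⟨[("s", 0), ("p", 1), ("d", 2), ("f", 3)]⟩
  let reversed_quantum_hash : PySem.Dict Int String :=
    quantum_hash.items.foldl (fun d kv => PySem.Dict.insert d kv.2 kv.1) ⟨[]⟩
  let _l : Int := match l with
    | none => n - 1
    | some v => if v == 0 then n - 1 else v
  let seq : List (Int × Int × String) :=
    (PySem.List.pyRange 1 (n + 1) 1).foldl (fun acc shell =>
      (PySem.List.pyRange 0 shell 1).foldl (fun acc subshell =>
        match PySem.Dict.get? reversed_quantum_hash subshell with
        | some letter => acc ++ [(shell + subshell, shell, PySem.Int.toStr shell ++ letter)]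
        | none => acc) acc) []
  PySem.List.sorted seq (fun x => toLex (x.1, toLex (x.2.1, x.2.2))) false

-- ===== PORT B =====
def klechkovski_alt (n : Int) (l : Option Int) : List (Int × Int × String) :=
  let letters : List String := ["s", "p", "d", "f"]
  let _l : Int := match l with
    | none => n - 1
    | some v => if v == 0 then n - 1 else v
  (PySem.List.pyRange 1 (2 * n) 1).foldl (fun acc priority =>
    (PySem.List.pyRange 3 (-1) (-1)).foldl (fun acc subshell =>
      let shell := priority - subshell
      if 1 ≤ shell ∧ shell ≤ n ∧ subshell < shell then
        acc ++ [(priority, shell, PySem.Int.toStr shell ++ PySem.List.pyGetD letters subshell "")]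
      else acc) acc) []

-- ===== PRECONDITION & SPEC =====
def Spec_klechkovski (n : Int) (l : Option Int) (out : List (Int × Int × String)) : Prop := out = klechkovski_alt n l
instance (n : Int) (l : Option Int) (out : List (Int × Int × String)) : Decidable (Spec_klechkovski n l out) := by unfold Spec_klechkovski; infer_instance

-- ===== CLAIM (what is proved, stated in full; the proofs are below) =====
def Claim_equal_klechkovski : Prop := ∀ (n : Int) (l : Option Int), Dom_klechkovski n l → Spec_klechkovski n l (klechkovski n l)

-- ===== LEMMAS AND PROOFS =====

-- label "{shell}{letter}" shared by both characterisations
def kLbl (s t : Int) : String := PySem.Int.toStr s ++ PySem.List.pyGetD ["s", "p", "d", "f"] t ""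

-- the lexicographic sort key Python's tuple sort uses
def kKey (x : Int × Int × String) : Int ×ₗ (Int ×ₗ String) := toLex (x.1, toLex (x.2.1, x.2.2))

-- A's row for a given shell (before sorting)
def kRow (s : Int) : List (Int × Int × String) :=
  ((PySem.List.pyRange 0 s 1).filter (fun t => decide (t ≤ 3))).map (fun t => (s + t, s, kLbl s t))

-- A's unsorted list
def kG (n : Int) : List (Int × Int × String) :=
  (PySem.List.pyRange 1 (n + 1) 1).flatMap kRow

-- B's diagonal p
def kDiag (n p : Int) : List (Int × Int × String) :=
  (([3, 2, 1, 0] : List Int).filter (fun t => decide (1 ≤ p - t ∧ p - t ≤ n ∧ t < p - t))).map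
    (fun t => (p, p - t, kLbl (p - t) t))

-- B's output
def kB (n : Int) : List (Int × Int × String) :=
  (PySem.List.pyRange 1 (2 * n) 1).flatMap (kDiag n)

lemma innerB (n p : Int) (acc : List (Int × Int × String)) :
    (PySem.List.pyRange 3 (-1) (-1)).foldl (fun acc t =>
      let shell := p - t
      if 1 ≤ shell ∧ shell ≤ n ∧ t < shell then
        acc ++ [(p, shell, PySem.Int.toStr shell ++ PySem.List.pyGetD ["s","p","d","f"] t "")]
      else acc) acc = acc ++ kDiag n p := by
  have h : PySem.List.pyRange 3 (-1) (-1) = [3,2,1,0] := by decide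
  rw [h]
  simp only [kDiag, kLbl, List.foldl_cons, List.foldl_nil, List.filter_cons, List.filter_nil]
  by_cases c3 : 1 ≤ p - 3 ∧ p - 3 ≤ n ∧ 3 < p - 3 <;>
    by_cases c2 : 1 ≤ p - 2 ∧ p - 2 ≤ n ∧ 2 < p - 2 <;>
      by_cases c1 : 1 ≤ p - 1 ∧ p - 1 ≤ n ∧ 1 < p - 1 <;>
        by_cases c0 : 1 ≤ p ∧ p ≤ n ∧ 0 < p <;>
          simp [c3, c2, c1, c0] <;> split_ifs <;> simp_all <;> omega

lemma klechkovski_alt_eq_kB (n : Int) (l : Option Int) : klechkovski_alt n l = kB n := by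
  unfold klechkovski_alt kB
  simp only []
  rw [PySem.List.foldl_congr_mem _ _ (fun acc p => acc ++ kDiag n p) _ (by
    intro acc p _; exact innerB n p acc)]
  rw [PySem.List.foldl_append_eq_flatMap]
  simp

lemma get?_rhd (t : Int) (ht : 0 ≤ t) :
    PySem.Dict.get? (⟨[((0:Int),"s"),(1,"p"),(2,"d"),(3,"f")]⟩ : PySem.Dict Int String) t =
      if t ≤ 3 then some (PySem.List.pyGetD ["s","p","d","f"] t "") else none := by
  by_cases h0 : t = 0
  · subst h0; rfl
  by_cases h1 : t = 1
  · subst h1; rfl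
  by_cases h2 : t = 2
  · subst h2; rfl
  by_cases h3 : t = 3
  · subst h3; rfl
  have h4 : ¬ t ≤ 3 := by omega
  simp [PySem.Dict.get?, h4]
  omega

lemma innerA (n s : Int) (acc : List (Int × Int × String)) :
    (PySem.List.pyRange 0 s 1).foldl (fun acc t =>
      match PySem.Dict.get? (⟨[((0:Int),"s"),(1,"p"),(2,"d"),(3,"f")]⟩ : PySem.Dict Int String) t with
      | some letter => acc ++ [(s + t, s, PySem.Int.toStr s ++ letter)]
      | none => acc) acc = acc ++ kRow s := by
  rw [PySem.List.foldl_congr_mem _ _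
      (fun acc t => if t ≤ 3 then acc ++ [(s + t, s, kLbl s t)] else acc) _ ?_]
  · rw [PySem.List.foldl_append_ite (fun t => t ≤ (3:Int)) (fun t => (s + t, s, kLbl s t))]
    rfl
  · intro acc t htmem
    have ht : 0 ≤ t := (PySem.List.mem_pyRange_one.mp htmem).1
    rw [get?_rhd t ht]
    by_cases h : t ≤ 3 <;> simp [h, kLbl]

lemma klechkovski_eq_sorted (n : Int) (l : Option Int) :
    klechkovski n l = PySem.List.sorted (kG n) kKey false := by
  unfold klechkovski
  have hr : ((⟨[("s", (0:Int)), ("p", 1), ("d", 2), ("f", 3)]⟩ : PySem.Dict String Int)).items.foldl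
      (fun d kv => PySem.Dict.insert d kv.2 kv.1) (⟨[]⟩ : PySem.Dict Int String)
      = ⟨[((0:Int),"s"),(1,"p"),(2,"d"),(3,"f")]⟩ := by rfl
  simp only [hr]
  rw [PySem.List.foldl_congr_mem _ _ (fun acc s => acc ++ kRow s) _ (by
    intro acc s _; exact innerA n s acc)]
  rw [PySem.List.foldl_append_eq_flatMap]
  rfl

lemma kKey_lt_fst {x y : Int × Int × String} (h : x.1 < y.1) : kKey x < kKey y := by
  obtain ⟨a, b, c⟩ := x; obtain ⟨d, e, f⟩ := y
  simp only [kKey]; simp [Prod.Lex.lt_iff, h]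

lemma kKey_lt_snd {x y : Int × Int × String} (h1 : x.1 = y.1) (h2 : x.2.1 < y.2.1) : kKey x < kKey y := by
  obtain ⟨a, b, c⟩ := x; obtain ⟨d, e, f⟩ := y
  simp only at h1 h2; subst h1
  simp [kKey, Prod.Lex.lt_iff, h2]

lemma mem_kDiag_fst {n p : Int} {x : Int × Int × String} (hx : x ∈ kDiag n p) : x.1 = p := by
  simp only [kDiag, List.mem_map] at hx
  obtain ⟨t, _, rfl⟩ := hx; rfl

lemma kB_pairwise (n : Int) : (kB n).Pairwise (fun a b => kKey a < kKey b) := by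
  unfold kB
  rw [List.pairwise_flatMap]
  constructor
  · intro p _
    unfold kDiag
    rw [List.pairwise_map]
    apply List.Pairwise.sublist (List.filter_sublist (l := [3,2,1,0]))
    have h : ([3,2,1,0] : List Int).Pairwise (fun a b => b < a) := by decide
    refine h.imp ?_
    intro a b hab
    exact kKey_lt_snd rfl (by dsimp only; omega)
  · exact (PySem.List.pairwise_lt_pyRange_one 1 (2*n)).imp
      (fun {p q} hpq x hx y hy => kKey_lt_fst (by rw [mem_kDiag_fst hx, mem_kDiag_fst hy]; exact hpq))

lemma pyRange_nil {a b : Int} (h : b ≤ a) : PySem.List.pyRange a b = [] := by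
  have h0 : (b - a).toNat = 0 := by omega
  simp [PySem.List.pyRange_one, h0]

lemma mid0 (n : Int) (hn : 5 ≤ n) :
    kDiag (n+1) (n+1) = kDiag n (n+1) ++ [(n+1, n+1, kLbl (n+1) 0)] := by
  simp only [kDiag, List.filter_cons, List.filter_nil]
  by_cases u : (3:Int) < n + 1 - 3
  · have a3 : (1 ≤ n + 1 - 3 ∧ n + 1 - 3 ≤ n + 1 ∧ 3 < n + 1 - 3) := ⟨by omega, by omega, u⟩
    have b3 : (1 ≤ n + 1 - 3 ∧ n + 1 - 3 ≤ n ∧ 3 < n + 1 - 3) := ⟨by omega, by omega, u⟩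
    have a2 : (1 ≤ n + 1 - 2 ∧ n + 1 - 2 ≤ n + 1 ∧ 2 < n + 1 - 2) := by omega
    have b2 : (1 ≤ n + 1 - 2 ∧ n + 1 - 2 ≤ n ∧ 2 < n + 1 - 2) := by omega
    have a1 : (1 ≤ n + 1 - 1 ∧ n + 1 - 1 ≤ n + 1 ∧ 1 < n + 1 - 1) := by omega
    have b1 : (1 ≤ n + 1 - 1 ∧ n + 1 - 1 ≤ n ∧ 1 < n + 1 - 1) := by omega
    have a0 : (1 ≤ n + 1 - 0 ∧ n + 1 - 0 ≤ n + 1 ∧ 0 < n + 1 - 0) := by omega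
    have b0 : ¬(n + 1 - 0 ≤ n) := by omega
    simp only [a3, b3, a2, b2, a1, b1, a0, b0, decide_true, decide_false, decide_eq_true_eq,
      if_true, if_false, List.map_cons, List.map_nil]
    simp
  · have a2 : (1 ≤ n + 1 - 2 ∧ n + 1 - 2 ≤ n + 1 ∧ 2 < n + 1 - 2) := by omega
    have b2 : (1 ≤ n + 1 - 2 ∧ n + 1 - 2 ≤ n ∧ 2 < n + 1 - 2) := by omega
    have a1 : (1 ≤ n + 1 - 1 ∧ n + 1 - 1 ≤ n + 1 ∧ 1 < n + 1 - 1) := by omega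
    have b1 : (1 ≤ n + 1 - 1 ∧ n + 1 - 1 ≤ n ∧ 1 < n + 1 - 1) := by omega
    have a0 : (1 ≤ n + 1 - 0 ∧ n + 1 - 0 ≤ n + 1 ∧ 0 < n + 1 - 0) := by omega
    have b0 : ¬(n + 1 - 0 ≤ n) := by omega
    simp only [u, a2, b2, a1, b1, a0, b0, decide_true, decide_false, decide_eq_true_eq,
      if_true, if_false, List.map_cons, List.map_nil]
    simp

lemma mid1 (n : Int) (hn : 5 ≤ n) :
    kDiag (n+1) (n+2) = kDiag n (n+2) ++ [(n+2, n+1, kLbl (n+1) 1)] := by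
  simp only [kDiag, List.filter_cons, List.filter_nil]
  have a3 : (1 ≤ n + 2 - 3 ∧ n + 2 - 3 ≤ n + 1 ∧ 3 < n + 2 - 3) := by omega
  have a2 : (1 ≤ n + 2 - 2 ∧ n + 2 - 2 ≤ n + 1 ∧ 2 < n + 2 - 2) := by omega
  have a1 : (1 ≤ n + 2 - 1 ∧ n + 2 - 1 ≤ n + 1 ∧ 1 < n + 2 - 1) := by omega
  have a0 : ¬(n + 2 - 0 ≤ n + 1) := by omega
  have b3 : (1 ≤ n + 2 - 3 ∧ n + 2 - 3 ≤ n ∧ 3 < n + 2 - 3) := by omega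
  have b2 : (1 ≤ n + 2 - 2 ∧ n + 2 - 2 ≤ n ∧ 2 < n + 2 - 2) := by omega
  have b1 : ¬(n + 2 - 1 ≤ n) := by omega
  have b0 : ¬(n + 2 - 0 ≤ n) := by omega
  simp only [a3, a2, a1, a0, b3, b2, b1, b0, decide_true, decide_false,
    decide_eq_true_eq, if_true, if_false, List.map_cons, List.map_nil]
  simp
  exact ⟨by omega, by rw [show (n:Int) + 2 - 1 = n + 1 by omega]⟩

lemma mid2 (n : Int) (hn : 5 ≤ n) :
    kDiag (n+1) (n+3) = kDiag n (n+3) ++ [(n+3, n+1, kLbl (n+1) 2)] := by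
  simp only [kDiag, List.filter_cons, List.filter_nil]
  have a3 : (1 ≤ n + 3 - 3 ∧ n + 3 - 3 ≤ n + 1 ∧ 3 < n + 3 - 3) := by omega
  have a2 : (1 ≤ n + 3 - 2 ∧ n + 3 - 2 ≤ n + 1 ∧ 2 < n + 3 - 2) := by omega
  have a1 : ¬(n + 3 - 1 ≤ n + 1) := by omega
  have a0 : ¬(n + 3 - 0 ≤ n + 1) := by omega
  have b3 : (1 ≤ n + 3 - 3 ∧ n + 3 - 3 ≤ n ∧ 3 < n + 3 - 3) := by omega
  have b2 : ¬(n + 3 - 2 ≤ n) := by omega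
  have b1 : ¬(n + 3 - 1 ≤ n) := by omega
  have b0 : ¬(n + 3 - 0 ≤ n) := by omega
  simp only [a3, a2, a1, a0, b3, b2, b1, b0, decide_true, decide_false,
    decide_eq_true_eq, if_true, if_false, List.map_cons, List.map_nil]
  simp
  exact ⟨by omega, by rw [show (n:Int) + 3 - 2 = n + 1 by omega]⟩

lemma mid3 (n : Int) (hn : 5 ≤ n) :
    kDiag (n+1) (n+4) = kDiag n (n+4) ++ [(n+4, n+1, kLbl (n+1) 3)] := by
  simp only [kDiag, List.filter_cons, List.filter_nil]
  have a3 : (1 ≤ n + 4 - 3 ∧ n + 4 - 3 ≤ n + 1 ∧ 3 < n + 4 - 3) := by omega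
  have a2 : ¬(n + 4 - 2 ≤ n + 1) := by omega
  have a1 : ¬(n + 4 - 1 ≤ n + 1) := by omega
  have a0 : ¬(n + 4 - 0 ≤ n + 1) := by omega
  have b3 : ¬(n + 4 - 3 ≤ n) := by omega
  have b2 : ¬(n + 4 - 2 ≤ n) := by omega
  have b1 : ¬(n + 4 - 1 ≤ n) := by omega
  have b0 : ¬(n + 4 - 0 ≤ n) := by omega
  simp only [a3, a2, a1, a0, b3, b2, b1, b0, decide_true, decide_false,
    decide_eq_true_eq, if_true, if_false, List.map_cons, List.map_nil]
  simp
  exact ⟨by omega, by rw [show (n:Int) + 4 - 3 = n + 1 by omega]⟩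

lemma kDiag_eq (n p : Int) (h : p ≤ n ∨ n + 5 ≤ p) : kDiag (n+1) p = kDiag n p := by
  unfold kDiag
  refine congrArg _ (List.filter_congr ?_)
  intro t ht
  fin_cases ht <;> exact decide_eq_decide.mpr (by omega)

lemma kDiag_nil (n p : Int) (h : n + 5 ≤ p) : kDiag (n+1) p = [] := by
  simp only [kDiag, List.map_eq_nil_iff, List.filter_eq_nil_iff]
  intro t ht
  fin_cases ht <;> simp <;> omega

lemma kRow_big (s : Int) (hs : 4 ≤ s) :
    kRow s = [(s + 0, s, kLbl s 0), (s + 1, s, kLbl s 1), (s + 2, s, kLbl s 2), (s + 3, s, kLbl s 3)] := by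
  unfold kRow
  rw [PySem.List.pyRange_one_append 0 4 s (by omega) (by omega)]
  have h04 : PySem.List.pyRange 0 4 = [0, 1, 2, 3] := by decide
  rw [h04, List.filter_append]
  have h2 : (PySem.List.pyRange 4 s).filter (fun t => decide (t ≤ 3)) = [] := by
    rw [List.filter_eq_nil_iff]
    intro t ht
    have := PySem.List.mem_pyRange_one.mp ht
    simp; omega
  rw [h2]
  rfl

lemma kG_succ (n : Int) (hn : 0 ≤ n) : kG (n+1) = kG n ++ kRow (n+1) := by
  unfold kG
  rw [PySem.List.pyRange_one_append 1 (n+1) (n+1+1) (by omega) (by omega), List.flatMap_append]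
  rw [PySem.List.pyRange_one_cons (by omega : n+1 < n+1+1), pyRange_nil (a := n+1+1) (b := n+1+1) (by omega)]
  simp

lemma kB_succ_perm (n : Int) (hn : 5 ≤ n) : (kB (n+1)).Perm (kB n ++ kRow (n+1)) := by
  unfold kB
  have h2 : 2 * (n + 1) = 2 * n + 2 := by ring
  rw [h2]
  rw [PySem.List.pyRange_one_append 1 (2*n) (2*n+2) (by omega) (by omega), List.flatMap_append]
  have htail : (PySem.List.pyRange (2*n) (2*n+2)).flatMap (kDiag (n+1)) = [] := by
    rw [PySem.List.pyRange_one_cons (by omega : 2*n < 2*n+2),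
        PySem.List.pyRange_one_cons (by omega : 2*n+1 < 2*n+2),
        pyRange_nil (a := 2*n+1+1) (b := 2*n+2) (by omega)]
    simp [kDiag_nil n (2*n) (by omega), kDiag_nil n (2*n+1) (by omega)]
  rw [htail, List.append_nil]
  -- split [1, 2n) into [1, n+1) ++ [n+1, n+5) ++ [n+5, 2n)
  rw [PySem.List.pyRange_one_append 1 (n+1) (2*n) (by omega) (by omega),
      PySem.List.pyRange_one_append (n+1) (n+5) (2*n) (by omega) (by omega)]
  have hmidrange : PySem.List.pyRange (n+1) (n+5) = [n+1, n+2, n+3, n+4] := by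
    rw [PySem.List.pyRange_one_cons (by omega : n+1 < n+5),
        PySem.List.pyRange_one_cons (by omega : n+1+1 < n+5),
        PySem.List.pyRange_one_cons (by omega : n+1+1+1 < n+5),
        PySem.List.pyRange_one_cons (by omega : n+1+1+1+1 < n+5),
        pyRange_nil (a := n+1+1+1+1+1) (b := n+5) (by omega)]
    norm_num
    omega
  have hlo : ∀ q ∈ PySem.List.pyRange 1 (n+1), kDiag (n+1) q = kDiag n q := by
    intro q hq
    have := PySem.List.mem_pyRange_one.mp hq
    exact kDiag_eq n q (Or.inl (by omega))
  have hhi : ∀ q ∈ PySem.List.pyRange (n+5) (2*n), kDiag (n+1) q = kDiag n q := by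
    intro q hq
    have := PySem.List.mem_pyRange_one.mp hq
    exact kDiag_eq n q (Or.inr (by omega))
  rw [List.flatMap_append, List.flatMap_append,
      List.flatMap_congr hlo, List.flatMap_congr hhi, hmidrange]
  simp only [List.flatMap_cons, List.flatMap_nil,
    mid0 n hn, mid1 n hn, mid2 n hn, mid3 n hn, List.append_nil]
  -- target side
  rw [kRow_big (n+1) (by omega)]
  simp only [List.flatMap_append, List.flatMap_cons, List.flatMap_nil, List.append_nil]
  have e0 : (n:Int) + 1 + 0 = n + 1 := by ring
  have e1 : (n:Int) + 1 + 1 = n + 2 := by ring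
  have e2 : (n:Int) + 1 + 2 = n + 3 := by ring
  have e3 : (n:Int) + 1 + 3 = n + 4 := by ring
  rw [e0, e1, e2, e3, ← Multiset.coe_eq_coe]
  simp only [← Multiset.coe_add]
  simp only [← Multiset.cons_coe, ← Multiset.singleton_add, Multiset.coe_nil]
  abel

lemma kB_nil (n : Int) (h : n ≤ 0) : kB n = [] := by
  unfold kB; rw [pyRange_nil (by omega)]; rfl

lemma kG_nil (n : Int) (h : n ≤ 0) : kG n = [] := by
  unfold kG; rw [pyRange_nil (by omega)]; rfl

lemma kB_perm_kG (n : Int) : (kB n).Perm (kG n) := by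
  have aux : ∀ m : Nat, 5 ≤ m → (kB (m:Int)).Perm (kG (m:Int)) := by
    intro m hm
    induction m, hm using Nat.le_induction with
    | base => decide
    | succ m hm ih =>
      have hc : ((m + 1 : Nat) : Int) = (m : Int) + 1 := by push_cast; ring
      rw [hc]
      refine (kB_succ_perm (m:Int) (by exact_mod_cast hm)).trans ?_
      rw [kG_succ (m:Int) (by positivity)]
      exact ih.append_right _
  by_cases h : n ≤ 0
  · rw [kB_nil n h, kG_nil n h]
  by_cases h6 : n < 6
  · have h1 : 1 ≤ n := by omega
    have h5 : n ≤ 5 := by omega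
    interval_cases n <;> decide
  · have := aux n.toNat (by omega)
    rwa [show ((n.toNat : Int)) = n by omega] at this

-- ===== VERDICT (by name: the statement is the Claim_ definition above) =====
theorem klechkovski_spec : Claim_equal_klechkovski := by
  intro n l _
  unfold Spec_klechkovski
  rw [klechkovski_eq_sorted, klechkovski_alt_eq_kB]
  exact PySem.List.sorted_eq_of_perm_of_pairwise_lt _ _ _ (kB_perm_kG n) (kB_pairwise n)
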